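-- pv_equiv track=rewrite | github.com/lulu5591/marksix | web/app.py | valid_smart
-- ===== SOURCE A (Python) =====
-- def longest_consecutive_run(nums):
--     s = sorted(nums)
--     best = 1
--     cur = 1
--     for i in range(1, len(s)):
--         if s[i] == s[i - 1] + 1:
--             cur += 1
--             if cur > best:
--                 best = cur
--         elif s[i] != s[i - 1]:
--             cur = 1
--     return best
--
-- def valid_smart(nums):
--     if len(nums) != 6:
--         return False
--     if sum(1 for x in nums if x % 2 == 0) != 3:
--         return False
--     if longest_consecutive_run(nums) > 2:
--         return False
--     return True
-- ===== SOURCE B (Python) =====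
-- def valid_smart(nums):
--     if len(nums) != 6:
--         return False
--     if sum(1 for x in nums if x % 2 == 0) != 3:
--         return False
--     s = set(nums)
--     return not any(x + 1 in s and x + 2 in s for x in s)
-- ===== Notes on version B (the rewrite author's own statement) =====
-- stated objective: simpler
-- what changed: Replaces the sort-and-scan longest-consecutive-run helper (stateful best/cur loop over adjacent pairs of the sorted list) by a direct set-membership test: a run of 3+ consecutive values exists iff some x has x+1 and x+2 in the set.
import Mathlib
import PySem

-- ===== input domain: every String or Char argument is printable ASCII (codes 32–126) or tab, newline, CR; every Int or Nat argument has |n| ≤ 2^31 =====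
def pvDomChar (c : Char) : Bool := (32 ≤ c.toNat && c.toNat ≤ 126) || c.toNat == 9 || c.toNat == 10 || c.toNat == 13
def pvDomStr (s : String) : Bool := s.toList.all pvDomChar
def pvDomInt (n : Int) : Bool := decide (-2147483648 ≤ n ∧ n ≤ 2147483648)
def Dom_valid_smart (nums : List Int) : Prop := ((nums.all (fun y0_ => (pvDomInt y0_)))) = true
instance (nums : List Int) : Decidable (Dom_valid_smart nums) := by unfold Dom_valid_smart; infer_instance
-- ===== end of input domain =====

-- B replaces A's sort-and-scan run-length helper by a direct set-membership triple test (simpler, no sort).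

-- ===== PORT A =====
def longest_consecutive_run (nums : List Int) : Int :=
  let s := PySem.List.sorted nums (fun x => x) false
  let bc := (PySem.List.pyRange 1 (PySem.List.len s) 1).foldl
    (fun (bc : Int × Int) i =>
      if PySem.List.pyGetD s i 0 = PySem.List.pyGetD s (i - 1) 0 + 1 then
        ((if bc.2 + 1 > bc.1 then bc.2 + 1 else bc.1), bc.2 + 1)
      else if PySem.List.pyGetD s i 0 ≠ PySem.List.pyGetD s (i - 1) 0 then
        (bc.1, 1)
      else bc)
    ((1 : Int), (1 : Int))
  bc.1

def valid_smart (nums : List Int) : Bool :=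
  if PySem.List.len nums ≠ 6 then false
  else if nums.foldl (fun acc x => if PySem.Int.mod x 2 = 0 then acc + 1 else acc) (0 : Int) ≠ 3 then false
  else if longest_consecutive_run nums > 2 then false
  else true

-- ===== PORT B =====
def valid_smart_alt (nums : List Int) : Bool :=
  if PySem.List.len nums ≠ 6 then false
  else if (nums.countP (fun x => PySem.Int.mod x 2 = 0) : Int) ≠ 3 then false
  else
    let s : PySem.Set Int := PySem.Set.ofList nums
    !(s.any (fun x => PySem.Set.contains s (x + 1) && PySem.Set.contains s (x + 2)))

-- ===== PRECONDITION & SPEC =====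
def Spec_valid_smart (nums : List Int) (out : Bool) : Prop := out = valid_smart_alt nums
instance (nums : List Int) (out : Bool) : Decidable (Spec_valid_smart nums out) := by unfold Spec_valid_smart; infer_instance

-- ===== CLAIM (what is proved, stated in full; the proofs are below) =====
def Claim_equal_valid_smart : Prop := ∀ (nums : List Int), Dom_valid_smart nums → Spec_valid_smart nums (valid_smart nums)

-- ===== LEMMAS AND PROOFS =====


def pvStep (s : List Int) (bc : Int × Int) (i : Int) : Int × Int :=
  if PySem.List.pyGetD s i 0 = PySem.List.pyGetD s (i - 1) 0 + 1 then
    ((if bc.2 + 1 > bc.1 then bc.2 + 1 else bc.1), bc.2 + 1)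
  else if PySem.List.pyGetD s i 0 ≠ PySem.List.pyGetD s (i - 1) 0 then
    (bc.1, 1)
  else bc

def runFold (p best cur : Int) : List Int → Int
  | [] => best
  | x :: xs =>
    if x = p + 1 then runFold x (if cur + 1 > best then cur + 1 else best) (cur + 1) xs
    else if x ≠ p then runFold x best 1 xs
    else runFold x best cur xs

theorem fold_run (rest : List Int) : ∀ (pre : List Int) (p best cur : Int),
    ((PySem.List.pyRange ((pre.length : Int) + 1)
        (PySem.List.len (pre ++ p :: rest)) 1).foldl
      (pvStep (pre ++ p :: rest)) (best, cur)).1 = runFold p best cur rest := by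
  induction rest with
  | nil =>
    intro pre p best cur
    rw [PySem.List.len_eq, PySem.List.pyRange_one_eq_nil (by simp)]
    simp [runFold]
  | cons x t ih =>
    intro pre p best cur
    rw [PySem.List.pyRange_one_cons (by rw [PySem.List.len_eq]; simp only [List.length_append, List.length_cons]; push_cast; omega)]
    rw [List.foldl_cons]
    have e2 : PySem.List.pyGetD (pre ++ p :: x :: t) ((pre.length : Int) + 1 - 1) 0 = p := by
      rw [show ((pre.length : Int) + 1 - 1) = (pre.length : Int) by ring]
      show (PySem.List.pyGet? _ _).getD 0 = p
      rw [PySem.List.pyGet?_append_length pre (x :: t) p]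
      rfl
    have e1 : PySem.List.pyGetD (pre ++ p :: x :: t) ((pre.length : Int) + 1) 0 = x := by
      rw [show pre ++ p :: x :: t = (pre ++ [p]) ++ x :: t by simp]
      rw [show ((pre.length : Int) + 1) = ((pre ++ [p]).length : Int) by simp]
      show (PySem.List.pyGet? _ _).getD 0 = x
      rw [PySem.List.pyGet?_append_length (pre ++ [p]) t x]
      rfl
    have hstep : pvStep (pre ++ p :: x :: t) (best, cur) ((pre.length : Int) + 1) =
        (if x = p + 1 then ((if cur + 1 > best then cur + 1 else best), cur + 1)
         else if x ≠ p then (best, 1) else (best, cur)) := by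
      unfold pvStep
      rw [e1, e2]
    rw [hstep]
    have hre : pre ++ p :: x :: t = (pre ++ [p]) ++ x :: t := by simp
    have hidx : ((pre.length : Int) + 1) + 1 = ((pre ++ [p]).length : Int) + 1 := by
      simp
    rw [runFold]
    split_ifs <;> (rw [hre, hidx]; exact ih (pre ++ [p]) x _ _)


def pvTriple (l : List Int) : Prop := ∃ x ∈ l, (x + 1) ∈ l ∧ (x + 2) ∈ l

theorem triple_cons (x : Int) (t : List Int) (hs : (x :: t).Pairwise (· ≤ ·)) :
    pvTriple (x :: t) ↔ ((x + 1) ∈ t ∧ (x + 2) ∈ t) ∨ pvTriple t := by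
  have hall : ∀ y ∈ t, x ≤ y := (List.pairwise_cons.1 hs).1
  constructor
  · rintro ⟨y, hy, h1, h2⟩
    rcases List.mem_cons.1 hy with rfl | hy'
    · left
      refine ⟨?_, ?_⟩
      · rcases List.mem_cons.1 h1 with h | h; · omega
        exact h
      · rcases List.mem_cons.1 h2 with h | h; · omega
        exact h
    · right
      have hxy := hall y hy'
      refine ⟨y, hy', ?_, ?_⟩
      · rcases List.mem_cons.1 h1 with h | h; · omega
        exact h
      · rcases List.mem_cons.1 h2 with h | h; · omega
        exact h
  · rintro (⟨h1, h2⟩ | ⟨y, hy, h1, h2⟩)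
    · exact ⟨x, List.mem_cons_self, List.mem_cons_of_mem _ h1, List.mem_cons_of_mem _ h2⟩
    · exact ⟨y, List.mem_cons_of_mem _ hy, List.mem_cons_of_mem _ h1, List.mem_cons_of_mem _ h2⟩


theorem runFold_gt_two (rest : List Int) : ∀ (p best cur : Int),
    (p :: rest).Pairwise (· ≤ ·) → 1 ≤ cur →
    (runFold p best cur rest > 2 ↔
      best > 2 ∨ (2 ≤ cur ∧ (p + 1) ∈ rest) ∨ ((p + 1) ∈ rest ∧ (p + 2) ∈ rest) ∨ pvTriple rest) := by
  induction rest with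
  | nil =>
    intro p best cur _ _
    simp [runFold, pvTriple]
  | cons x t ih =>
    intro p best cur hs hcur
    have hpx : p ≤ x := (List.pairwise_cons.1 hs).1 x List.mem_cons_self
    have hs' : (x :: t).Pairwise (· ≤ ·) := (List.pairwise_cons.1 hs).2
    have hall : ∀ y ∈ t, x ≤ y := (List.pairwise_cons.1 hs').1
    have htc := triple_cons x t hs'
    rcases lt_trichotomy x (p + 1) with hx | hx | hx
    · -- x = p  (since p ≤ x < p+1)
      have hxp : x = p := by omega
      rw [runFold, if_neg (by omega), if_neg (by simp [hxp])]
      rw [ih x best cur hs' hcur]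
      subst hxp
      simp only [List.mem_cons, htc]
      constructor
      · rintro (h | ⟨h1, h2⟩ | ⟨h1, h2⟩ | h)
        · exact Or.inl h
        · exact Or.inr (Or.inl ⟨h1, Or.inr h2⟩)
        · exact Or.inr (Or.inr (Or.inl ⟨Or.inr h1, Or.inr h2⟩))
        · exact Or.inr (Or.inr (Or.inr (Or.inr h)))
      · rintro (h | ⟨hc, (h1 | h1)⟩ | ⟨(h1 | h1), (h2 | h2)⟩ | (⟨h1, h2⟩ | h))
        · exact Or.inl h
        · omega
        · exact Or.inr (Or.inl ⟨hc, h1⟩)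
        · omega
        · omega
        · omega
        · exact Or.inr (Or.inr (Or.inl ⟨h1, h2⟩))
        · exact Or.inr (Or.inr (Or.inl ⟨h1, h2⟩))
        · exact Or.inr (Or.inr (Or.inr h))
    · -- x = p + 1
      rw [runFold, if_pos hx]
      rw [ih x _ (cur + 1) hs' (by omega)]
      have hb : ((if cur + 1 > best then cur + 1 else best) > 2) ↔ (best > 2 ∨ 2 ≤ cur) := by
        split_ifs <;> omega
      rw [hb]
      simp only [List.mem_cons, htc]
      constructor
      · rintro ((h | h) | ⟨_, h1⟩ | ⟨h1, h2⟩ | h)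
        · exact Or.inl h
        · exact Or.inr (Or.inl ⟨h, Or.inl hx.symm⟩)
        · exact Or.inr (Or.inr (Or.inl ⟨Or.inl hx.symm, Or.inr (by rw [show x + 1 = p + 2 by omega] at h1; exact h1)⟩))
        · exact Or.inr (Or.inr (Or.inr (Or.inl ⟨h1, h2⟩)))
        · exact Or.inr (Or.inr (Or.inr (Or.inr h)))
      · rintro (h | ⟨hc, _⟩ | ⟨h1, (h2 | h2)⟩ | (⟨h1, h2⟩ | h))
        · exact Or.inl (Or.inl h)
        · exact Or.inl (Or.inr hc)
        · omega
        · exact Or.inr (Or.inl ⟨by omega, by rw [show (p:Int) + 2 = x + 1 by omega] at h2; exact h2⟩)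
        · exact Or.inr (Or.inr (Or.inl ⟨h1, h2⟩))
        · exact Or.inr (Or.inr (Or.inr h))
    · -- p + 1 < x
      have h1nt : (p + 1) ∉ t := fun h => absurd (hall _ h) (by omega)
      rw [runFold, if_neg (by omega), if_pos (by omega)]
      rw [ih x best 1 hs' le_rfl]
      simp only [List.mem_cons, htc]
      constructor
      · rintro (h | ⟨hc, _⟩ | ⟨h1, h2⟩ | h)
        · exact Or.inl h
        · omega
        · exact Or.inr (Or.inr (Or.inr (Or.inl ⟨h1, h2⟩)))
        · exact Or.inr (Or.inr (Or.inr (Or.inr h)))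
      · rintro (h | ⟨_, (h1 | h1)⟩ | ⟨(h1 | h1), _⟩ | (⟨h1, h2⟩ | h))
        · exact Or.inl h
        · omega
        · exact absurd h1 h1nt
        · omega
        · exact absurd h1 h1nt
        · exact Or.inr (Or.inr (Or.inl ⟨h1, h2⟩))
        · exact Or.inr (Or.inr (Or.inr h))


-- A's helper detects exactly a triple of consecutive values.
theorem lcr_gt_two_iff (nums : List Int) :
    longest_consecutive_run nums > 2 ↔ pvTriple nums := by
  show ((PySem.List.pyRange 1 (PySem.List.len (PySem.List.sorted nums (fun x => x) false)) 1).foldl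
      (pvStep (PySem.List.sorted nums (fun x => x) false)) ((1 : Int), (1 : Int))).1 > 2 ↔ pvTriple nums
  have hmem : ∀ x : Int, x ∈ PySem.List.sorted nums (fun x => x) false ↔ x ∈ nums :=
    fun x => PySem.List.mem_sorted nums (fun x => x) false x
  have hpair : (PySem.List.sorted nums (fun x => x) false).Pairwise (· ≤ ·) := by
    simpa using PySem.List.sorted_pairwise nums (fun x : Int => x)
  have htr : pvTriple (PySem.List.sorted nums (fun x => x) false) ↔ pvTriple nums := by
    simp only [pvTriple, hmem]
  rcases h : PySem.List.sorted nums (fun x => x) false with _ | ⟨p, rest⟩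
  · rw [h] at htr
    rw [PySem.List.len_eq, PySem.List.pyRange_one_eq_nil (by simp)]
    simp only [List.foldl_nil]
    rw [← htr]
    simp [pvTriple]
  · rw [h] at htr hpair
    have hfr := fold_run rest [] p 1 1
    simp only [List.nil_append, List.length_nil, Nat.cast_zero, zero_add] at hfr
    rw [hfr]
    rw [runFold_gt_two rest p 1 1 hpair le_rfl]
    rw [← htr, triple_cons p rest hpair]
    constructor
    · rintro (h | ⟨hc, _⟩ | h | h)
      · omega
      · omega
      · exact Or.inl h
      · exact Or.inr h
    · rintro (h | h)
      · exact Or.inr (Or.inr (Or.inl h))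
      · exact Or.inr (Or.inr (Or.inr h))

-- ===== VERDICT (by name: the statement is the Claim_ definition above) =====
theorem valid_smart_spec : Claim_equal_valid_smart := by
  intro nums _
  unfold Spec_valid_smart valid_smart valid_smart_alt
  by_cases h6 : PySem.List.len nums ≠ 6
  · rw [if_pos h6, if_pos h6]
  · rw [if_neg h6, if_neg h6]
    rw [PySem.List.foldl_ite_add_one]
    simp only [zero_add]
    by_cases hc : (nums.countP (fun x => PySem.Int.mod x 2 = 0) : Int) ≠ 3
    · rw [if_pos hc, if_pos hc]
    · rw [if_neg hc, if_neg hc]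
      have key : longest_consecutive_run nums > 2 ↔
          ((PySem.Set.ofList nums).any
            (fun x => PySem.Set.contains (PySem.Set.ofList nums) (x + 1) &&
              PySem.Set.contains (PySem.Set.ofList nums) (x + 2)) = true) := by
        rw [lcr_gt_two_iff]
        simp [List.any_eq_true, PySem.Set.mem_ofList, pvTriple]
      by_cases h : longest_consecutive_run nums > 2
      · rw [if_pos h, key.1 h]
        rfl
      · rw [if_neg h]
        have hfalse : ((PySem.Set.ofList nums).any
            (fun x => PySem.Set.contains (PySem.Set.ofList nums) (x + 1) &&
              PySem.Set.contains (PySem.Set.ofList nums) (x + 2))) = false := by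
          cases hb : ((PySem.Set.ofList nums).any
            (fun x => PySem.Set.contains (PySem.Set.ofList nums) (x + 1) &&
              PySem.Set.contains (PySem.Set.ofList nums) (x + 2))) with
          | false => rfl
          | true => exact absurd (key.2 hb) h
        rw [hfalse]
        rfl
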